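-- pv_equiv track=rewrite | github.com/ArthurNoiry/prime-sort | prime_sort/utils.py | asso_prime
-- ===== SOURCE A (Python) =====
-- def list_prime(n): #makes the list of the prime numbers beetween 2 and 2*n
--     l=[2]
--     for k in range(3, 2*n):
--         prime = 0
--         for i in range(len(l)):
--             if (k % l[i]==0):
--                 prime = 1
--         if prime==0:
--             l.append(k)
--     return l
--
-- def asso_prime(n):#finds the closest prime number for each number beetween 1 and n
--     l = []
--     l_prime = list_prime(n)
--     for k in range(n):
--         prime=l_prime[0]
--         for i in range(1,len(l_prime)):
--             if(abs(k-prime)>abs(k-l_prime[i])):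
--                 prime=l_prime[i]
--         l.append([k,prime])
--     return l
-- ===== SOURCE B (Python) =====
-- # Sieve-free faster rewrite: primes by sqrt trial division once, then per-k
-- # binary search (bisect) in the sorted prime list, smaller prime on ties.
--
-- def _is_prime(p):
--     d = 2
--     while d * d <= p:
--         if p % d == 0:
--             return False
--         d += 1
--     return p >= 2
--
-- def _bisect_left(a, x):
--     lo, hi = 0, len(a)
--     while lo < hi:
--         mid = (lo + hi) // 2
--         if a[mid] < x:
--             lo = mid + 1
--         else:
--             hi = mid
--     return lo
--
-- def asso_prime(n):
--     hi = 2 * n if 2 * n > 3 else 3   # ensure the list contains 2 even for n <= 1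
--     primes = [p for p in range(2, hi) if _is_prime(p)]
--     out = []
--     for k in range(n):
--         j = _bisect_left(primes, k)
--         if j == 0:
--             best = primes[0]
--         elif j == len(primes):
--             best = primes[-1]
--         else:
--             lo, hi2 = primes[j - 1], primes[j]
--             best = lo if k - lo <= hi2 - k else hi2
--         out.append([k, best])
--     return out
-- ===== Notes on version B (the rewrite author's own statement) =====
-- stated objective: faster
-- what changed: A builds primes by trial-dividing each candidate by every prime found so far and then, for each k in range(n), linearly scans the whole prime list for the closest one; B generates primes with a sqrt-bounded trial division and finds each k's closest prime by binary search (bisect_left) over the sorted prime list, taking the smaller neighbour on ties.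
import Mathlib
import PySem

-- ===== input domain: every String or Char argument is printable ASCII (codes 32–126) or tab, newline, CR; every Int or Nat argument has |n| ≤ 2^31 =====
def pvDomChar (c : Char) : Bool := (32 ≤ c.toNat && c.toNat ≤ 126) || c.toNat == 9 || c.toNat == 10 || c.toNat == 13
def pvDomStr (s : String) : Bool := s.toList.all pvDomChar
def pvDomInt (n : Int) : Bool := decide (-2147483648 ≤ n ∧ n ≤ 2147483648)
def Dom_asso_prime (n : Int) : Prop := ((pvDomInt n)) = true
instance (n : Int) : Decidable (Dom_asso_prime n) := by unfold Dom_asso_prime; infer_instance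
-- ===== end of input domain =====

-- B replaces A's prime-list-so-far trial division and per-k full scan by a sqrt-bounded
-- primality test plus per-k binary search (bisect_left) on the sorted prime list: faster.

-- ===== PORT A =====

-- 'for i in range(len(l)): if k % l[i]==0: prime = 1' ; indices are always in range
def list_prime (n : Int) : List Int :=
  (PySem.List.pyRange 3 (2*n) 1).foldl (fun l k =>
    let prime : Int :=
      (PySem.List.pyRange 0 (l.length : Int) 1).foldl
        (fun pr i => if PySem.Int.mod k (PySem.List.pyGetD l i 0) = 0 then 1 else pr) 0
    if prime = 0 then l ++ [k] else l) [2]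

-- 'prime = l_prime[0]' then the scan from index 1; l_prime is never empty (seeded [2])
def asso_prime (n : Int) : List (List Int) :=
  let l_prime := list_prime n
  (PySem.List.pyRange 0 n 1).foldl (fun l k =>
    let prime :=
      (PySem.List.pyRange 1 (l_prime.length : Int) 1).foldl
        (fun pr i =>
          if |k - pr| > |k - PySem.List.pyGetD l_prime i 0| then PySem.List.pyGetD l_prime i 0
          else pr)
        (PySem.List.pyGetD l_prime 0 0)
    l ++ [[k, prime]]) []

-- ===== PORT B =====

-- Source B's _is_prime while-loop 'while d*d <= p: …'
def trialB (p d : Int) : Bool :=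
  if h : d * d ≤ p then
    (if PySem.Int.mod p d = 0 then false else trialB p (d + 1))
  else true
termination_by (p + 2 - d).toNat
decreasing_by
  have hd : d ≤ p + 1 := by
    rcases (by omega : d ≤ 0 ∨ 1 ≤ d) with h0 | h1
    · have := mul_self_nonneg d; omega
    · have : d * 1 ≤ d * d :=
        mul_le_mul_of_nonneg_left (by omega) (by omega)
      omega
  omega

def isPrimeB (p : Int) : Bool := trialB p 2 && decide (2 ≤ p)

-- Source B's _bisect_left loop; list accesses are always in range
def bisectLeft (a : List Int) (x : Int) (lo hi : Int) : Int :=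
  if h : lo < hi then
    let mid := PySem.Int.floordiv (lo + hi) 2
    if PySem.List.pyGetD a mid 0 < x then bisectLeft a x (mid + 1) hi
    else bisectLeft a x lo mid
  else lo
termination_by (hi - lo).toNat
decreasing_by
  all_goals
    have hb := PySem.Int.floordiv_two_mid_bounds (le_of_lt h)
    have hlt : PySem.Int.floordiv (lo + hi) 2 < hi := by
      rw [PySem.Int.floordiv_lt_iff_lt_mul (by omega)]; omega
    omega

-- Source B's _closest: pick between the two bisection neighbours, smaller on ties
def closestB (primes : List Int) (k : Int) : Int :=
  let j := bisectLeft primes k 0 (primes.length : Int)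
  if j = 0 then PySem.List.pyGetD primes 0 0
  else if j = (primes.length : Int) then PySem.List.pyGetD primes (-1) 0
  else if k - PySem.List.pyGetD primes (j - 1) 0 ≤ PySem.List.pyGetD primes j 0 - k then
    PySem.List.pyGetD primes (j - 1) 0
  else PySem.List.pyGetD primes j 0

def asso_prime_alt (n : Int) : List (List Int) :=
  let hi := if 2 * n > 3 then 2 * n else 3
  let primes := (PySem.List.pyRange 2 hi 1).filter isPrimeB
  (PySem.List.pyRange 0 n 1).foldl (fun out k => out ++ [[k, closestB primes k]]) []

-- ===== PRECONDITION & SPEC =====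
def Spec_asso_prime (n : Int) (out : List (List Int)) : Prop := out = asso_prime_alt n
instance (n : Int) (out : List (List Int)) : Decidable (Spec_asso_prime n out) := by unfold Spec_asso_prime; infer_instance

-- ===== CLAIM (what is proved, stated in full; the proofs are below) =====
def Claim_equal_asso_prime : Prop := ∀ (n : Int), Dom_asso_prime n → Spec_asso_prime n (asso_prime n)

-- ===== LEMMAS AND PROOFS =====

-- the canonical prime list: primes below m, as Ints, ascending
def pnat (m : Nat) : List Nat := (List.range m).filter (fun p => decide (Nat.Prime p))
def pint (m : Nat) : List Int := List.map (fun p : Nat => (p : Int)) (pnat m)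

-- "r is the closest element of P to k, smallest on ties"
def IsBest (k : Int) (P : List Int) (r : Int) : Prop :=
  r ∈ P ∧ ∀ x ∈ P, |k - r| < |k - x| ∨ (|k - r| = |k - x| ∧ r ≤ x)

theorem isBest_unique (k : Int) (P : List Int) (r s : Int)
    (hr : IsBest k P r) (hs : IsBest k P s) : r = s := by
  rcases hr with ⟨hrm, hrb⟩
  rcases hs with ⟨hsm, hsb⟩
  rcases hrb s hsm with h1 | ⟨h1, h1'⟩ <;> rcases hsb r hrm with h2 | ⟨h2, h2'⟩ <;> omega

theorem scan_isBest (k : Int) (t : List Int) : ∀ (h : Int),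
    (h :: t).Pairwise (· ≤ ·) →
    IsBest k (h :: t) (t.foldl (fun pr x => if |k - pr| > |k - x| then x else pr) h) := by
  induction t with
  | nil =>
      intro h _
      refine ⟨by simp, ?_⟩
      intro x hx
      rcases List.mem_singleton.mp hx with rfl
      right; exact ⟨rfl, le_refl _⟩
  | cons q t' ih =>
      intro h hs
      have hhq : h ≤ q := (List.pairwise_cons.mp hs).1 q (by simp)
      have hq : (q :: t').Pairwise (· ≤ ·) := (List.pairwise_cons.mp hs).2
      simp only [List.foldl_cons]
      by_cases hc : |k - h| > |k - q|
      · rw [if_pos hc]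
        obtain ⟨hm, hb⟩ := ih q hq
        refine ⟨List.mem_cons_of_mem _ hm, ?_⟩
        intro x hx
        rcases List.mem_cons.mp hx with rfl | hx'
        · have h1 := hb q (by simp)
          omega
        · exact hb x hx'
      · rw [if_neg hc]
        have hh : (h :: t').Pairwise (· ≤ ·) := by
          rw [List.pairwise_cons] at hs ⊢
          exact ⟨fun x hx => hs.1 x (List.mem_cons_of_mem q hx), (List.pairwise_cons.mp hs.2).2⟩
        obtain ⟨hm, hb⟩ := ih h hh
        refine ⟨?_, ?_⟩
        · rcases List.mem_cons.mp hm with heq | hm'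
          · rw [heq]; exact List.mem_cons_self
          · exact List.mem_cons_of_mem _ (List.mem_cons_of_mem _ hm')
        · intro x hx
          rcases List.mem_cons.mp hx with rfl | hx'
          · exact hb x (by simp)
          rcases List.mem_cons.mp hx' with rfl | hx''
          · have h1 := hb h (by simp)
            omega
          · exact hb x (List.mem_cons_of_mem _ hx'')

theorem getD_mono (a : List Int) (hs : a.Pairwise (· ≤ ·)) (i j : Nat)
    (hij : i ≤ j) (hj : j < a.length) : a.getD i 0 ≤ a.getD j 0 := by
  rcases Nat.eq_or_lt_of_le hij with rfl | hlt
  · exact le_refl _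
  · rw [List.getD_eq_getElem a 0 (by omega), List.getD_eq_getElem a 0 hj]
    exact List.pairwise_iff_getElem.mp hs i j (by omega) hj hlt

theorem bisect_spec (a : List Int) (x : Int) (hs : a.Pairwise (· ≤ ·)) (lo hi : Int)
    (h0 : 0 ≤ lo) (hlh : lo ≤ hi) (hha : hi ≤ (a.length : Int))
    (Hlo : ∀ i : Nat, (i : Int) < lo → a.getD i 0 < x)
    (Hhi : ∀ i : Nat, hi ≤ (i : Int) → i < a.length → x ≤ a.getD i 0) :
    lo ≤ bisectLeft a x lo hi ∧ bisectLeft a x lo hi ≤ hi ∧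
    (∀ i : Nat, (i : Int) < bisectLeft a x lo hi → a.getD i 0 < x) ∧
    (∀ i : Nat, bisectLeft a x lo hi ≤ (i : Int) → i < a.length → x ≤ a.getD i 0) := by
  rw [bisectLeft]
  split
  · rename_i hlt
    have hb := PySem.Int.floordiv_two_mid_bounds (le_of_lt hlt)
    have hmidlt : PySem.Int.floordiv (lo + hi) 2 < hi := by
      rw [PySem.Int.floordiv_lt_iff_lt_mul (by omega)]; omega
    simp only []
    set mid := PySem.Int.floordiv (lo + hi) 2 with hmid
    have hget : PySem.List.pyGetD a mid 0 = a.getD mid.toNat 0 := by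
      rw [PySem.List.pyGetD_eq_getElem a 0 (by omega) (by omega),
        List.getD_eq_getElem a 0 (by omega)]
    split
    · rename_i hxlt
      obtain ⟨c1, c2, c3, c4⟩ := bisect_spec a x hs (mid + 1) hi (by omega) (by omega) hha
        (fun i hi2 => lt_of_le_of_lt
          (getD_mono a hs i mid.toNat (by omega) (by omega)) (hget ▸ hxlt))
        Hhi
      exact ⟨by omega, c2, c3, c4⟩
    · rename_i hxge
      obtain ⟨c1, c2, c3, c4⟩ := bisect_spec a x hs lo mid (by omega) (by omega) (by omega) Hlo
        (fun i hi2 hilen => by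
          have h1 : x ≤ a.getD mid.toNat 0 := by rw [← hget]; omega
          exact le_trans h1 (getD_mono a hs mid.toNat i (by omega) hilen))
      exact ⟨c1, by omega, c3, c4⟩
  · rename_i hge
    exact ⟨le_refl lo, hlh, Hlo, fun i hi2 hilen => Hhi i (by omega) hilen⟩
termination_by (hi - lo).toNat
decreasing_by
  · omega
  · omega

theorem closestB_isBest (P : List Int) (k : Int) (hne : P ≠ [])
    (hs : P.Pairwise (· ≤ ·)) : IsBest k P (closestB P k) := by
  have hlen : 0 < P.length := by
    cases P with
    | nil => exact absurd rfl hne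
    | cons a t => simp
  obtain ⟨h0, h1, Hlt, Hge⟩ := bisect_spec P k hs 0 (P.length : Int) (le_refl 0)
    (by exact_mod_cast Nat.zero_le _) (le_refl _)
    (fun i hi2 => absurd hi2 (by omega))
    (fun i hi2 hilen => absurd hi2 (by omega))
  simp only [closestB]
  split_ifs with hj0 hjL hc
  · -- j = 0 : all elements ≥ k, take the head
    rw [PySem.List.pyGetD_zero]
    have hmem : P.getD 0 0 ∈ P := by
      rw [List.getD_eq_getElem P 0 hlen]; exact List.getElem_mem _
    have hk0 : k ≤ P.getD 0 0 := Hge 0 (by omega) hlen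
    refine ⟨hmem, ?_⟩
    intro x hx
    obtain ⟨i, hilen, hxi⟩ := List.mem_iff_getElem.mp hx
    have gi : P.getD i 0 = x := by rw [List.getD_eq_getElem P 0 hilen, hxi]
    have hki : k ≤ P.getD i 0 := Hge i (by omega) hilen
    have hmo : P.getD 0 0 ≤ P.getD i 0 := getD_mono P hs 0 i (Nat.zero_le _) hilen
    have e1 : |k - P.getD 0 0| = P.getD 0 0 - k := by rw [abs_of_nonpos (by omega)]; ring
    have e2 : |k - x| = x - k := by rw [abs_of_nonpos (by omega)]; ring
    omega
  · -- j = len : all elements < k, take the last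
    rw [PySem.List.pyGetD_neg_one _ _ hne]
    have hr : P.getLast hne = P.getD (P.length - 1) 0 := by
      rw [List.getLast_eq_getElem, List.getD_eq_getElem P 0 (by omega)]
    have hrk : P.getD (P.length - 1) 0 < k := Hlt (P.length - 1) (by omega)
    refine ⟨List.getLast_mem hne, ?_⟩
    intro x hx
    obtain ⟨i, hilen, hxi⟩ := List.mem_iff_getElem.mp hx
    have gi : P.getD i 0 = x := by rw [List.getD_eq_getElem P 0 hilen, hxi]
    have hki : P.getD i 0 < k := Hlt i (by omega)
    have hmo : P.getD i 0 ≤ P.getD (P.length - 1) 0 :=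
      getD_mono P hs i (P.length - 1) (by omega) (by omega)
    have e1 : |k - P.getD (P.length - 1) 0| = k - P.getD (P.length - 1) 0 :=
      abs_of_nonneg (by omega)
    have e2 : |k - x| = k - x := abs_of_nonneg (by omega)
    rw [hr]
    omega
  all_goals
  · -- middle: candidates P[j-1] (below k) and P[j] (at or above k)
    have hjpos : 0 < bisectLeft P k 0 (P.length : Int) := by omega
    have hjlt : bisectLeft P k 0 (P.length : Int) < (P.length : Int) := by omega
    set j := bisectLeft P k 0 (P.length : Int) with hjdef
    have ha : PySem.List.pyGetD P (j - 1) 0 = P.getD (j.toNat - 1) 0 := by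
      rw [PySem.List.pyGetD_eq_getElem P 0 (by omega) (by omega),
        List.getD_eq_getElem P 0 (by omega)]
      congr 1; omega
    have hb2 : PySem.List.pyGetD P j 0 = P.getD j.toNat 0 := by
      rw [PySem.List.pyGetD_eq_getElem P 0 (by omega) (by omega),
        List.getD_eq_getElem P 0 (by omega)]
    have hlo : P.getD (j.toNat - 1) 0 < k := Hlt (j.toNat - 1) (by omega)
    have hhi : k ≤ P.getD j.toNat 0 := Hge j.toNat (by omega) (by omega)
    have hmema : P.getD (j.toNat - 1) 0 ∈ P := by
      rw [List.getD_eq_getElem P 0 (by omega)]; exact List.getElem_mem _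
    have hmemb : P.getD j.toNat 0 ∈ P := by
      rw [List.getD_eq_getElem P 0 (by omega)]; exact List.getElem_mem _
    have e1 : |k - P.getD (j.toNat - 1) 0| = k - P.getD (j.toNat - 1) 0 :=
      abs_of_nonneg (by omega)
    have e2 : |k - P.getD j.toNat 0| = P.getD j.toNat 0 - k := by
      rw [abs_of_nonpos (by omega)]; ring
    simp only [ha, hb2] at hc ⊢
    refine ⟨by assumption, ?_⟩
    intro x hx
    obtain ⟨i, hilen, hxi⟩ := List.mem_iff_getElem.mp hx
    have gi : P.getD i 0 = x := by rw [List.getD_eq_getElem P 0 hilen, hxi]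
    rcases lt_or_ge (i : Int) j with hij | hij
    · have hxk : P.getD i 0 < k := Hlt i hij
      have hmo : P.getD i 0 ≤ P.getD (j.toNat - 1) 0 :=
        getD_mono P hs i (j.toNat - 1) (by omega) (by omega)
      have e3 : |k - x| = k - x := abs_of_nonneg (by omega)
      omega
    · have hxk : k ≤ P.getD i 0 := Hge i hij hilen
      have hmo : P.getD j.toNat 0 ≤ P.getD i 0 := getD_mono P hs j.toNat i (by omega) hilen
      have e3 : |k - x| = x - k := by rw [abs_of_nonpos (by omega)]; ring
      omega

theorem pint_lt (m : Nat) : (pint m).Pairwise (· < ·) := by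
  unfold pint pnat
  exact List.Pairwise.map _ (fun a b (h : a < b) => by exact_mod_cast h)
    (List.pairwise_lt_range.filter _)

theorem pint_sorted (m : Nat) : (pint m).Pairwise (· ≤ ·) :=
  (pint_lt m).imp le_of_lt

theorem two_mem_pint (m : Nat) (hm : 3 ≤ m) : (2 : Int) ∈ pint m := by
  unfold pint pnat
  refine List.mem_map.mpr ⟨2, List.mem_filter.mpr ⟨List.mem_range.mpr ?_, by decide⟩, rfl⟩
  omega

theorem pint_ne_nil (m : Nat) (hm : 3 ≤ m) : pint m ≠ [] :=
  List.ne_nil_of_mem (two_mem_pint m hm)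

theorem mem_pint (m : Nat) (x : Int) :
    x ∈ pint m ↔ ∃ p : Nat, p.Prime ∧ p < m ∧ x = (p : Int) := by
  unfold pint pnat
  simp only [List.mem_map, List.mem_filter, List.mem_range, decide_eq_true_eq]
  tauto

theorem flag_aux (k : Int) (l : List Int) : ∀ b : Int,
    l.foldl (fun pr p => if PySem.Int.mod k p = 0 then 1 else pr) b
    = if l.any (fun p => decide (PySem.Int.mod k p = 0)) then 1 else b := by
  induction l with
  | nil => intro b; simp
  | cons p t ih =>
      intro b
      simp only [List.foldl_cons, List.any_cons, ih]
      by_cases hp : PySem.Int.mod k p = 0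
      · simp [hp]
      · simp [hp]

theorem flag_eq (l : List Int) (k : Int) :
    (PySem.List.pyRange 0 (l.length : Int) 1).foldl
      (fun pr i => if PySem.Int.mod k (PySem.List.pyGetD l i 0) = 0 then 1 else pr) (0 : Int)
    = if l.any (fun p => decide (PySem.Int.mod k p = 0)) then 1 else 0 := by
  rw [PySem.List.foldl_pyRange_zero_pyGetD' l 0
    (fun pr p => if PySem.Int.mod k p = 0 then 1 else pr) 0]
  exact flag_aux k l 0

-- the list A has built so far contains a divisor of b iff b is composite
theorem any_div_iff (b : Int) (hb : 3 ≤ b) :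
    (pint b.toNat).any (fun p => decide (PySem.Int.mod b p = 0)) = true
    ↔ ¬ Nat.Prime b.toNat := by
  rw [List.any_eq_true]
  constructor
  · rintro ⟨x, hx, hxd⟩
    obtain ⟨q, hq, hqm, rfl⟩ := (mem_pint _ x).mp hx
    rw [decide_eq_true_eq, PySem.Int.mod_eq_zero_iff_dvd] at hxd
    intro hbp
    have hqd : q ∣ b.toNat := by
      rw [← Int.natCast_dvd_natCast]
      simpa [Int.toNat_of_nonneg (by omega : (0:Int) ≤ b)] using hxd
    rcases hbp.eq_one_or_self_of_dvd q hqd with h1 | h1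
    · exact Nat.Prime.one_lt hq |>.ne' h1
    · omega
  · intro hnp
    refine ⟨(b.toNat.minFac : Int), ?_, ?_⟩
    · rw [mem_pint]
      refine ⟨b.toNat.minFac, Nat.minFac_prime (by omega), ?_, rfl⟩
      have hle := Nat.minFac_le (by omega : 0 < b.toNat)
      rcases Nat.lt_or_ge b.toNat.minFac b.toNat with h1 | h1
      · exact h1
      · exfalso
        exact hnp (Nat.prime_def_minFac.mpr ⟨by omega, by omega⟩)
    · rw [decide_eq_true_eq, PySem.Int.mod_eq_zero_iff_dvd]
      have := Nat.minFac_dvd b.toNat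
      have h2 : (b.toNat.minFac : Int) ∣ (b.toNat : Int) := Int.natCast_dvd_natCast.mpr this
      simpa [Int.toNat_of_nonneg (by omega : (0:Int) ≤ b)] using h2

theorem listA_aux : ∀ b : Int, 3 ≤ b →
    (PySem.List.pyRange 3 b 1).foldl (fun l k =>
      let prime : Int :=
        (PySem.List.pyRange 0 (l.length : Int) 1).foldl
          (fun pr i => if PySem.Int.mod k (PySem.List.pyGetD l i 0) = 0 then 1 else pr) 0
      if prime = 0 then l ++ [k] else l) [2] = pint b.toNat := by
  intro b hb
  induction b, hb using Int.le_induction with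
  | base =>
      rw [PySem.List.pyRange_one_eq_nil (le_refl 3)]
      decide
  | succ b hb ih =>
      rw [PySem.List.pyRange_one_succ_right (by omega), List.foldl_append, ih,
        List.foldl_cons, List.foldl_nil]
      simp only [flag_eq]
      have hcast : ((b.toNat : Nat) : Int) = b := Int.toNat_of_nonneg (by omega)
      have hsucc : (b + 1).toNat = b.toNat + 1 := by omega
      by_cases hpr : Nat.Prime b.toNat
      · have hany : (pint b.toNat).any (fun p => decide (PySem.Int.mod b p = 0)) = false := by
          rw [← Bool.not_eq_true]
          exact fun h => (any_div_iff b (by omega)).mp h hpr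
        rw [hany]
        norm_num
        rw [hsucc]
        unfold pint pnat
        rw [List.range_succ, List.filter_append, List.map_append]
        congr 1
        simp [hpr, hcast]
      · have hany : (pint b.toNat).any (fun p => decide (PySem.Int.mod b p = 0)) = true :=
          (any_div_iff b (by omega)).mpr hpr
        rw [hany]
        norm_num
        rw [hsucc]
        unfold pint pnat
        rw [List.range_succ, List.filter_append, List.map_append]
        simp [hpr]

theorem list_prime_eq (n : Int) :
    list_prime n = pint (if 2 * n > 3 then 2 * n else 3).toNat := by
  unfold list_prime
  split
  · exact listA_aux (2 * n) (by omega)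
  · rename_i hle
    rw [PySem.List.pyRange_one_eq_nil (by omega), List.foldl_nil]
    decide

theorem trialB_spec (p d : Int) (hd : 1 ≤ d) :
    trialB p d = true ↔ ∀ e : Int, d ≤ e → e * e ≤ p → ¬ (e ∣ p) := by
  rw [trialB]
  split
  · rename_i hle
    split
    · rename_i hmod
      simp only [Bool.false_eq_true, false_iff]
      intro hall
      exact hall d le_rfl hle ((PySem.Int.mod_eq_zero_iff_dvd p d).mp hmod)
    · rename_i hmod
      rw [trialB_spec p (d + 1) (by omega)]
      constructor
      · intro hall e he hee
        rcases eq_or_lt_of_le he with rfl | hlt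
        · exact fun hdvd => hmod ((PySem.Int.mod_eq_zero_iff_dvd p d).mpr hdvd)
        · exact hall e (by omega) hee
      · intro hall e he hee
        exact hall e (by omega) hee
  · rename_i hgt
    simp only [true_iff]
    intro e he hee
    have h1 : d * d ≤ e * e := mul_le_mul he he (by omega) (by omega)
    omega
termination_by (p + 2 - d).toNat
decreasing_by
  have hd2 : d ≤ p + 1 := by
    rcases (by omega : d ≤ 0 ∨ 1 ≤ d) with h0 | h1
    · have := mul_self_nonneg d; omega
    · have : d * 1 ≤ d * d :=
        mul_le_mul_of_nonneg_left (by omega) (by omega)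
      omega
  omega

theorem isPrimeB_nat (p : Nat) : isPrimeB (p : Int) = decide (Nat.Prime p) := by
  unfold isPrimeB
  by_cases h2 : 2 ≤ p
  · have hd : decide (2 ≤ (p : Int)) = true := decide_eq_true_eq.mpr (by exact_mod_cast h2)
    rw [hd, Bool.and_true]
    have hsp := trialB_spec (p : Int) 2 (by omega)
    cases htr : trialB (p : Int) 2 with
    | true =>
        have hall := hsp.mp htr
        have hprime : Nat.Prime p := by
          rw [Nat.prime_def_le_sqrt]
          refine ⟨h2, fun m hm hms => ?_⟩
          have hmm : (m : Int) * (m : Int) ≤ (p : Int) := by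
            exact_mod_cast (by nlinarith [Nat.le_sqrt'.mp hms] : (m * m : Nat) ≤ p)
          intro hdvd
          exact hall (m : Int) (by exact_mod_cast hm) hmm (Int.natCast_dvd_natCast.mpr hdvd)
        simp [hprime]
    | false =>
        symm
        rw [decide_eq_false_iff_not]
        intro hprime
        have : trialB (p : Int) 2 = true := by
          rw [hsp]
          intro e he hee hdvd
          have he0 : 0 ≤ e := by omega
          have hedvd : e.toNat ∣ p := by
            rw [← Int.natCast_dvd_natCast]
            simpa [Int.toNat_of_nonneg he0] using hdvd
          rcases (Nat.Prime.eq_one_or_self_of_dvd hprime e.toNat hedvd) with h1 | h1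
          · omega
          · have hpe : e = (p : Int) := by omega
            have : (p : Int) * (p : Int) ≤ (p : Int) := hpe ▸ hee
            nlinarith [(by exact_mod_cast h2 : (2:Int) ≤ (p:Int))]
        rw [this] at htr
        exact Bool.noConfusion htr
  · have hd : decide (2 ≤ (p : Int)) = false := by
      rw [decide_eq_false_iff_not]
      intro hc
      exact h2 (by exact_mod_cast hc)
    rw [hd, Bool.and_false]
    symm
    rw [decide_eq_false_iff_not]
    exact fun hp => h2 hp.two_le

theorem filter_eq (hi : Int) (h3 : 3 ≤ hi) :
    (PySem.List.pyRange 2 hi 1).filter isPrimeB = pint hi.toNat := by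
  have hM : hi.toNat = 2 + (hi - 2).toNat := by omega
  rw [PySem.List.pyRange_one, List.filter_map]
  unfold pint pnat
  rw [hM, List.range_add, List.filter_append]
  have h01 : (List.range 2).filter (fun p => decide (Nat.Prime p)) = [] := by decide
  rw [h01, List.nil_append, List.filter_map, List.map_map]
  have hfn : (isPrimeB ∘ fun k : Nat => 2 + (k : Int))
      = ((fun p => decide (Nat.Prime p)) ∘ fun x : Nat => 2 + x) := by
    funext m
    simp only [Function.comp_apply]
    have : (2 : Int) + (m : Int) = ((2 + m : Nat) : Int) := by push_cast; ring
    rw [this, isPrimeB_nat]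
  rw [hfn]
  apply List.map_congr_left
  intro a _
  simp only [Function.comp_apply]
  push_cast
  ring

-- ===== VERDICT (by name: the statement is the Claim_ definition above) =====
theorem scan_eq_closest (P : List Int) (k : Int) (hne : P ≠ [])
    (hs : P.Pairwise (· ≤ ·)) :
    (PySem.List.pyRange 1 (P.length : Int) 1).foldl
      (fun pr i =>
        if |k - pr| > |k - PySem.List.pyGetD P i 0| then PySem.List.pyGetD P i 0 else pr)
      (PySem.List.pyGetD P 0 0)
    = closestB P k := by
  rw [PySem.List.foldl_pyRange_pyGetD' P 0
    (fun pr p => if |k - pr| > |k - p| then p else pr) _ (by omega : (0:Int) ≤ 1)]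
  obtain ⟨h, t, rfl⟩ := List.exists_cons_of_ne_nil hne
  rw [PySem.List.pyGetD_zero_cons]
  simp only [Int.toNat_one, List.drop_succ_cons, List.drop_zero]
  exact isBest_unique k (h :: t) _ _ (scan_isBest k t h hs)
    (closestB_isBest (h :: t) k hne hs)

theorem asso_prime_spec : Claim_equal_asso_prime := by
  unfold Claim_equal_asso_prime Spec_asso_prime
  intro n _
  have h3 : (3 : Int) ≤ (if 2 * n > 3 then 2 * n else 3) := by split <;> omega
  have hM : 3 ≤ (if 2 * n > 3 then 2 * n else 3).toNat := by omega
  simp only [asso_prime, asso_prime_alt]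
  rw [list_prime_eq n, filter_eq _ h3]
  set P := pint (if 2 * n > 3 then 2 * n else 3).toNat with hP
  rw [PySem.List.foldl_append_singleton_eq_map, PySem.List.foldl_append_singleton_eq_map,
    List.nil_append, List.nil_append]
  apply List.map_congr_left
  intro k _
  rw [scan_eq_closest P k (pint_ne_nil _ hM) (pint_sorted _)]
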